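-- pv_equiv track=rewrite | github.com/shafe123/AoC21 | day10.py | processLines
-- ===== SOURCE A (Python) =====
-- import queue
--
-- pointDict = {
--     ')': 3,
--     ']': 57,
--     '}': 1197,
--     '>': 25137
-- }
--
-- pointDict2 = {
--     ')': 1,
--     ']': 2,
--     '}': 3,
--     '>': 4
-- }
--
-- delimiterDict = {
--     ')': '(',
--     ']': '[',
--     '}': '{',
--     '>': '<'
-- }
--
-- leftDelimiterDict = {value: key for key, value in delimiterDict.items()}
--
-- leftDelimiters = ['(', '[', '{', '<']
--
-- rightDelimiters = [')', ']', '}', '>']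
--
-- def processLine(line):
--     q = queue.LifoQueue()
--     for character in line:
--         if character in leftDelimiters:
--             q.put(character)
--         elif character in rightDelimiters:
--             lastChar = q.get()
--             if lastChar != delimiterDict[character]:
--                 return lastChar, character
--
--     return '', ''
--
-- def autoComplete(line):
--     q = queue.LifoQueue()
--     for character in line:
--         if character in leftDelimiters:
--             q.put(character)
--         elif character in rightDelimiters:
--             lastChar = q.get()
--
--     autoScore = 0
--     while not q.empty():
--         currentCharacter = q.get()
--         matchingCharacter = leftDelimiterDict[currentCharacter]
--         autoScore = autoScore * 5 + pointDict2[matchingCharacter]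
--     return autoScore
--
-- def processLines(allLines):
--     errors = []
--     incompleteScores = []
--
--     for line in allLines:
--         expected, got = processLine(line)
--         if expected != '':
--             errors.append((expected, got))
--         else:
--             incompleteScores.append(autoComplete(line))
--
--     errorSum = 0
--     for error in errors:
--         errorSum += pointDict[error[1]]
--
--     incompleteScores.sort()
--
--     return errorSum, incompleteScores[int((len(incompleteScores)-1)/2)]
-- ===== SOURCE B (Python) =====
-- pointDict = {
--     ')': 3,
--     ']': 57,
--     '}': 1197,
--     '>': 25137
-- }
--
-- def processLines(allLines):
--     errorSum = 0
--     incompleteScores = []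
--     for line in allLines:
--         stack = []
--         bad = None
--         for ch in line:
--             i = "([{<".find(ch)
--             if i >= 0:
--                 stack.append(i)
--             else:
--                 j = ")]}>".find(ch)
--                 if j >= 0:
--                     if stack and stack[-1] == j:
--                         stack.pop()
--                     else:
--                         bad = ch
--                         break
--         if bad is not None:
--             errorSum += pointDict[bad]
--         else:
--             score = 0
--             while stack:
--                 score = score * 5 + 1 + stack.pop()
--             incompleteScores.append(score)
--     incompleteScores.sort()
--     return errorSum, incompleteScores[(len(incompleteScores) - 1) // 2]
-- ===== Notes on version B (the rewrite author's own statement) =====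
-- stated objective: faster
-- what changed: One fused single pass per line over a plain list of opener indices replaces A's two separate LifoQueue scans (processLine, then autoComplete rescanning the whole line) and its intermediate errors list: the corruption score is accumulated inline and the completion score is folded directly off the leftover stack.
import Mathlib
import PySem

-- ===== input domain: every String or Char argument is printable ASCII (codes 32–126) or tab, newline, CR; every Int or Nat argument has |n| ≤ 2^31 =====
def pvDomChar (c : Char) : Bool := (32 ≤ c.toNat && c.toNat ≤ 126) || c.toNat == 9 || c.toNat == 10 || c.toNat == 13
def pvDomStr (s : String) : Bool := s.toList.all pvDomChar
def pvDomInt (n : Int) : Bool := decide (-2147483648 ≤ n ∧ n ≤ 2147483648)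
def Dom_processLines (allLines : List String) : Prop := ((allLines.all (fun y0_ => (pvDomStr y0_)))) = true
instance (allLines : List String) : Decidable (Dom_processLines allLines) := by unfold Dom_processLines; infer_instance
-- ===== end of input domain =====

-- B fuses A's two LifoQueue scans per line into one pass over a plain opener-index stack
-- (measurably faster by a constant factor); equivalence is about the RETURN value only.

-- ===== PORT A =====
def pvLefts : List Char := ['(', '[', '{', '<']
def pvRights : List Char := [')', ']', '}', '>']
-- delimiterDict
def pvDelim (c : Char) : Char := if c = ')' then '(' else if c = ']' then '[' else if c = '}' then '{' else '<'
-- leftDelimiterDict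
def pvLeftDelim (c : Char) : Char := if c = '(' then ')' else if c = '[' then ']' else if c = '{' then '}' else '>'
-- pointDict2
def pvPts2 (c : Char) : Int := if c = ')' then 1 else if c = ']' then 2 else if c = '}' then 3 else 4
-- pointDict (keyed by the 1-char strings A stores in its errors list)
def pvPts1 (s : String) : Int := if s = ")" then 3 else if s = "]" then 57 else if s = "}" then 1197 else 25137

def processLineGo : List Char → List Char → String × String
  | _, [] => ("", "")
  | stack, c :: rest =>
    if c ∈ pvLefts then processLineGo (c :: stack) rest
    else if c ∈ pvRights then
      match stack with
      | last :: s' =>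
        if last ≠ pvDelim c then (String.ofList [last], String.ofList [c]) else processLineGo s' rest
      | [] => ("?", "?")  -- q.get() on an empty LifoQueue blocks forever in Python; excluded by Pre_
    else processLineGo stack rest

def processLine (line : String) : String × String := processLineGo [] line.toList

def autoGo : List Char → List Char → List Char
  | stack, [] => stack
  | stack, c :: rest =>
    if c ∈ pvLefts then autoGo (c :: stack) rest
    else if c ∈ pvRights then
      match stack with
      | _ :: s' => autoGo s' rest
      | [] => autoGo [] rest  -- q.get() blocks forever in Python; excluded by Pre_
    else autoGo stack rest

def autoScoreGo : Int → List Char → Int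
  | s, [] => s
  | s, c :: r => autoScoreGo (s * 5 + pvPts2 (pvLeftDelim c)) r

def autoComplete (line : String) : Int := autoScoreGo 0 (autoGo [] line.toList)

def processLines (allLines : List String) : Int × Int :=
  let acc := allLines.foldl (fun (acc : List (String × String) × List Int) line =>
      let r := processLine line
      if r.1 ≠ "" then (acc.1 ++ [r], acc.2)
      else (acc.1, acc.2 ++ [autoComplete line])) ([], [])
  let errorSum := acc.1.foldl (fun s e => s + pvPts1 e.2) 0
  let ss := PySem.List.sorted acc.2 (fun x => x) false
  -- int((len-1)/2): float truncation toward zero = Int.tdiv here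
  (errorSum, (PySem.List.pyGet? ss (Int.tdiv ((ss.length : Int) - 1) 2)).getD 0)

-- ===== PORT B =====
-- "([{<".find(ch)
def altOpenIdx (c : Char) : Int :=
  if c = '(' then 0 else if c = '[' then 1 else if c = '{' then 2 else if c = '<' then 3 else -1
-- ")]}>".find(ch)
def altCloseIdx (c : Char) : Int :=
  if c = ')' then 0 else if c = ']' then 1 else if c = '}' then 2 else if c = '>' then 3 else -1
-- pointDict in Source B
def altPts (c : Char) : Int :=
  if c = ')' then 3 else if c = ']' then 57 else if c = '}' then 1197 else 25137

-- the fused per-line scan: (corrupting closer if any, leftover opener-index stack)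
def altScan : List Int → List Char → Option Char × List Int
  | stack, [] => (none, stack)
  | stack, c :: rest =>
    let i := altOpenIdx c
    if 0 ≤ i then altScan (i :: stack) rest
    else
      let j := altCloseIdx c
      if 0 ≤ j then
        match stack with
        | t :: s' => if t = j then altScan s' rest else (some c, stack)
        | [] => (some c, stack)
      else altScan stack rest

-- while stack: score = score * 5 + 1 + stack.pop()
def altScore : Int → List Int → Int
  | s, [] => s
  | s, t :: r => altScore (s * 5 + 1 + t) r

def processLines_alt (allLines : List String) : Int × Int :=
  let acc := allLines.foldl (fun (acc : Int × List Int) line =>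
      match altScan [] line.toList with
      | (some c, _) => (acc.1 + altPts c, acc.2)
      | (none, st) => (acc.1, acc.2 ++ [altScore 0 st])) (0, [])
  let ss := PySem.List.sorted acc.2 (fun x => x) false
  (acc.1, (PySem.List.pyGet? ss (PySem.Int.floordiv ((ss.length : Int) - 1) 2)).getD 0)

-- ===== PRECONDITION & SPEC =====
-- per-line status: none = A blocks forever (LifoQueue.get on an empty queue),
-- some true = line not corrupted, some false = corrupted
def pvPreScan : List Char → List Char → Option Bool
  | _, [] => some true
  | stack, c :: rest =>
    if c = '(' ∨ c = '[' ∨ c = '{' ∨ c = '<' then pvPreScan (c :: stack) rest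
    else if c = ')' ∨ c = ']' ∨ c = '}' ∨ c = '>' then
      match stack with
      | [] => none
      | t :: s' =>
        if (c = ')' ∧ t = '(') ∨ (c = ']' ∧ t = '[') ∨ (c = '}' ∧ t = '{') ∨ (c = '>' ∧ t = '<')
        then pvPreScan s' rest else some false
    else pvPreScan stack rest

-- Pre_ excludes exactly the inputs on which Python A does not return: lines where a closing
-- bracket arrives on an empty stack (LifoQueue.get() blocks forever), and inputs whose every
-- line is corrupted (incompleteScores is empty, so A raises IndexError on the median index).
def Pre_processLines (allLines : List String) : Prop :=
  (∀ l ∈ allLines, pvPreScan [] l.toList ≠ none) ∧ (∃ l ∈ allLines, pvPreScan [] l.toList = some true)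
instance (allLines : List String) : Decidable (Pre_processLines allLines) := by
  unfold Pre_processLines; infer_instance

def pvWitness_processLines : List String := ["([])", "((("]

def Spec_processLines (allLines : List String) (out : Int × Int) : Prop := out = processLines_alt allLines
instance (allLines : List String) (out : Int × Int) : Decidable (Spec_processLines allLines out) := by
  unfold Spec_processLines; infer_instance

-- ===== CLAIM (what is proved, stated in full; the proofs are below) =====
def Claim_equal_processLines : Prop := ∀ (allLines : List String), Dom_processLines allLines → Pre_processLines allLines → Spec_processLines allLines (processLines allLines)


-- ===== LEMMAS AND PROOFS =====

theorem pv_mem_lefts (c : Char) : c ∈ pvLefts ↔ (c = '(' ∨ c = '[' ∨ c = '{' ∨ c = '<') := by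
  simp [pvLefts]

theorem pv_mem_rights (c : Char) : c ∈ pvRights ↔ (c = ')' ∨ c = ']' ∨ c = '}' ∨ c = '>') := by
  simp [pvRights]

theorem pv_open_nonneg (c : Char) : 0 ≤ altOpenIdx c ↔ (c = '(' ∨ c = '[' ∨ c = '{' ∨ c = '<') := by
  unfold altOpenIdx; split_ifs <;> simp_all

theorem pv_close_nonneg (c : Char) : 0 ≤ altCloseIdx c ↔ (c = ')' ∨ c = ']' ∨ c = '}' ∨ c = '>') := by
  unfold altCloseIdx; split_ifs <;> simp_all

theorem pv_match_iff (t c : Char) (ht : t = '(' ∨ t = '[' ∨ t = '{' ∨ t = '<')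
    (hc : c = ')' ∨ c = ']' ∨ c = '}' ∨ c = '>') :
    ((t = pvDelim c ↔ ((c = ')' ∧ t = '(') ∨ (c = ']' ∧ t = '[') ∨ (c = '}' ∧ t = '{') ∨ (c = '>' ∧ t = '<'))) ∧
     (altOpenIdx t = altCloseIdx c ↔ ((c = ')' ∧ t = '(') ∨ (c = ']' ∧ t = '[') ∨ (c = '}' ∧ t = '{') ∨ (c = '>' ∧ t = '<')))) := by
  rcases ht with h1 | h1 | h1 | h1 <;> rcases hc with h2 | h2 | h2 | h2 <;> subst h1 <;> subst h2 <;> decide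

theorem pv_pts2_eq (c : Char) (h : c ∈ pvLefts) : pvPts2 (pvLeftDelim c) = 1 + altOpenIdx c := by
  rw [pv_mem_lefts] at h
  rcases h with h | h | h | h <;> subst h <;> decide

theorem pv_pts1_eq (c : Char) (h : c ∈ pvRights) : pvPts1 (String.ofList [c]) = altPts c := by
  rw [pv_mem_rights] at h
  rcases h with h | h | h | h <;> subst h <;> decide


theorem pv_scan_agree : ∀ (chars stackA : List Char),
    (∀ x ∈ stackA, x ∈ pvLefts) →
    pvPreScan stackA chars ≠ none →
      ((pvPreScan stackA chars = some false →
        ∃ c, (altScan (stackA.map altOpenIdx) chars).1 = some c ∧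
          (processLineGo stackA chars).1 ≠ "" ∧
          (processLineGo stackA chars).2 = String.ofList [c] ∧ c ∈ pvRights) ∧
      (pvPreScan stackA chars = some true →
        altScan (stackA.map altOpenIdx) chars = (none, (autoGo stackA chars).map altOpenIdx) ∧
        processLineGo stackA chars = ("", "") ∧
        (∀ x ∈ autoGo stackA chars, x ∈ pvLefts))) := by
  intro chars
  induction chars with
  | nil =>
    intro stackA hst h
    refine ⟨fun hf => ?_, fun ht => ?_⟩
    · simp [pvPreScan] at hf
    · exact ⟨by simp [altScan, autoGo], by simp [processLineGo], by simpa [autoGo] using hst⟩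
  | cons c rest ih =>
    intro stackA hst h
    by_cases hL : c = '(' ∨ c = '[' ∨ c = '{' ∨ c = '<'
    · have hLm : c ∈ pvLefts := (pv_mem_lefts c).mpr hL
      have hpre : pvPreScan stackA (c :: rest) = pvPreScan (c :: stackA) rest := by
        simp [pvPreScan, hL]
      have halt : altScan (stackA.map altOpenIdx) (c :: rest)
          = altScan ((c :: stackA).map altOpenIdx) rest := by
        simp [altScan, (pv_open_nonneg c).mpr hL]
      have hpl : processLineGo stackA (c :: rest) = processLineGo (c :: stackA) rest := by
        simp [processLineGo, hLm]
      have hag : autoGo stackA (c :: rest) = autoGo (c :: stackA) rest := by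
        simp [autoGo, hLm]
      have hst' : ∀ x ∈ (c :: stackA), x ∈ pvLefts := by
        intro x hx
        rw [List.mem_cons] at hx
        rcases hx with rfl | hx
        · exact hLm
        · exact hst _ hx
      rw [hpre] at h ⊢
      rw [halt, hpl, hag]
      exact ih (c :: stackA) hst' h
    · by_cases hR : c = ')' ∨ c = ']' ∨ c = '}' ∨ c = '>'
      · have hRm : c ∈ pvRights := (pv_mem_rights c).mpr hR
        have hLm : c ∉ pvLefts := fun hh => hL ((pv_mem_lefts c).mp hh)
        have hOneg : ¬ 0 ≤ altOpenIdx c := fun hh => hL ((pv_open_nonneg c).mp hh)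
        match stackA, hst with
        | [], _ =>
          exfalso; apply h; simp [pvPreScan, hL, hR]
        | t :: s', hst =>
          have htL : t ∈ pvLefts := hst t (by simp)
          have hmi := pv_match_iff t c ((pv_mem_lefts t).mp htL) hR
          by_cases hm : (c = ')' ∧ t = '(') ∨ (c = ']' ∧ t = '[') ∨ (c = '}' ∧ t = '{') ∨ (c = '>' ∧ t = '<')
          · have hpre : pvPreScan (t :: s') (c :: rest) = pvPreScan s' rest := by
              simp [pvPreScan, hL, hR, hm]
            have halt : altScan ((t :: s').map altOpenIdx) (c :: rest)
                = altScan (s'.map altOpenIdx) rest := by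
              simp [altScan, hOneg, (pv_close_nonneg c).mpr hR, hmi.2.mpr hm]
            have hpl : processLineGo (t :: s') (c :: rest) = processLineGo s' rest := by
              have : ¬ t ≠ pvDelim c := by simp [hmi.1.mpr hm]
              simp [processLineGo, hLm, hRm, this]
            have hag : autoGo (t :: s') (c :: rest) = autoGo s' rest := by
              simp [autoGo, hLm, hRm]
            rw [hpre] at h ⊢
            rw [halt, hpl, hag]
            exact ih s' (fun x hx => hst x (List.mem_cons_of_mem _ hx)) h
          · have hpre : pvPreScan (t :: s') (c :: rest) = some false := by
              simp [pvPreScan, hL, hR, hm]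
            have hne : altOpenIdx t ≠ altCloseIdx c := fun hh => hm (hmi.2.mp hh)
            have hneD : t ≠ pvDelim c := fun hh => hm (hmi.1.mp hh)
            have hplEq : processLineGo (t :: s') (c :: rest) = (String.ofList [t], String.ofList [c]) := by
              simp [processLineGo, hLm, hRm, hneD]
            have hmkne : String.ofList [t] ≠ "" := by
              intro hh
              have h2 := congrArg String.toList hh
              simp at h2
            rw [hpre]
            refine ⟨fun _ => ⟨c, ?_, ?_, ?_, hRm⟩, fun ht => by simp at ht⟩
            · simp [altScan, hOneg, (pv_close_nonneg c).mpr hR, hne]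
            · rw [hplEq]; exact hmkne
            · rw [hplEq]
      · have hLm : c ∉ pvLefts := fun hh => hL ((pv_mem_lefts c).mp hh)
        have hRm : c ∉ pvRights := fun hh => hR ((pv_mem_rights c).mp hh)
        have hOneg : ¬ 0 ≤ altOpenIdx c := fun hh => hL ((pv_open_nonneg c).mp hh)
        have hCneg : ¬ 0 ≤ altCloseIdx c := fun hh => hR ((pv_close_nonneg c).mp hh)
        have hpre : pvPreScan stackA (c :: rest) = pvPreScan stackA rest := by
          simp [pvPreScan, hL, hR]
        have halt : altScan (stackA.map altOpenIdx) (c :: rest)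
            = altScan (stackA.map altOpenIdx) rest := by
          simp [altScan, hOneg, hCneg]
        have hpl : processLineGo stackA (c :: rest) = processLineGo stackA rest := by
          simp [processLineGo, hLm, hRm]
        have hag : autoGo stackA (c :: rest) = autoGo stackA rest := by
          simp [autoGo, hLm, hRm]
        rw [hpre] at h ⊢
        rw [halt, hpl, hag]
        exact ih stackA hst h

theorem pv_score_agree : ∀ (st : List Char) (s : Int), (∀ x ∈ st, x ∈ pvLefts) →
    altScore s (st.map altOpenIdx) = autoScoreGo s st := by
  intro st
  induction st with
  | nil => intro s _; rfl
  | cons c r ih =>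
    intro s hst
    have hc : c ∈ pvLefts := hst c (by simp)
    simp only [List.map, altScore, autoScoreGo, pv_pts2_eq c hc]
    rw [show s * 5 + (1 + altOpenIdx c) = s * 5 + 1 + altOpenIdx c by ring]
    exact ih _ (fun x hx => hst x (List.mem_cons_of_mem _ hx))

theorem pv_fold_agree : ∀ (lines : List String) (errsA : List (String × String)) (scores : List Int) (eB : Int),
    (∀ l ∈ lines, pvPreScan [] l.toList ≠ none) →
    eB = errsA.foldl (fun s e => s + pvPts1 e.2) 0 →
    (lines.foldl (fun (acc : Int × List Int) line =>
      match altScan [] line.toList with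
      | (some c, _) => (acc.1 + altPts c, acc.2)
      | (none, st) => (acc.1, acc.2 ++ [altScore 0 st])) (eB, scores)).1 =
      ((lines.foldl (fun (acc : List (String × String) × List Int) line =>
        let r := processLine line
        if r.1 ≠ "" then (acc.1 ++ [r], acc.2)
        else (acc.1, acc.2 ++ [autoComplete line])) (errsA, scores)).1).foldl
          (fun s e => s + pvPts1 e.2) 0 ∧
    (lines.foldl (fun (acc : Int × List Int) line =>
      match altScan [] line.toList with
      | (some c, _) => (acc.1 + altPts c, acc.2)
      | (none, st) => (acc.1, acc.2 ++ [altScore 0 st])) (eB, scores)).2 =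
      (lines.foldl (fun (acc : List (String × String) × List Int) line =>
        let r := processLine line
        if r.1 ≠ "" then (acc.1 ++ [r], acc.2)
        else (acc.1, acc.2 ++ [autoComplete line])) (errsA, scores)).2 := by
  intro lines
  induction lines with
  | nil =>
    intro errsA scores eB h he
    exact ⟨he, rfl⟩
  | cons line rest ih =>
    intro errsA scores eB h he
    have hline : pvPreScan [] line.toList ≠ none := h line (by simp)
    have hsc := pv_scan_agree line.toList [] (by simp) hline
    simp only [List.map_nil] at hsc
    rcases hps : pvPreScan [] line.toList with _ | b
    · exact absurd hps hline
    · cases b with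
      | false =>
        obtain ⟨c, h1, h2, h3, h4⟩ := hsc.1 hps
        rcases hAS : altScan [] line.toList with ⟨o, st⟩
        rw [hAS] at h1
        simp only at h1
        subst h1
        rw [List.foldl_cons, List.foldl_cons, hAS]
        simp only [processLine, ne_eq, h2, not_false_eq_true, if_true]
        apply ih _ _ _ (fun l hl => h l (List.mem_cons_of_mem _ hl))
        rw [List.foldl_append, List.foldl_cons, List.foldl_nil, ← he]
        show eB + altPts c = eB + pvPts1 (processLine line).2
        rw [show (processLine line).2 = String.ofList [c] from h3, pv_pts1_eq c h4]
      | true =>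
        obtain ⟨hA, hPL, hstL⟩ := hsc.2 hps
        rw [List.foldl_cons, List.foldl_cons, hA]
        simp only [processLine, hPL, ne_eq, not_true_eq_false, if_false,
          pv_score_agree _ _ hstL]
        unfold autoComplete
        exact ih _ _ _ (fun l hl => h l (List.mem_cons_of_mem _ hl)) he

theorem pv_idx_eq (xs : List Int) :
    (PySem.List.pyGet? xs (Int.tdiv ((xs.length : Int) - 1) 2)).getD 0
      = (PySem.List.pyGet? xs (PySem.Int.floordiv ((xs.length : Int) - 1) 2)).getD 0 := by
  cases xs with
  | nil => simp [PySem.List.pyGet?, PySem.List.pyIdx?, PySem.Int.floordiv]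
  | cons x t =>
    have hlen : (((x :: t).length : Int) - 1) = ((t.length : Nat) : Int) := by
      simp
    rw [hlen]
    have h1 : Int.tdiv ((t.length : Nat) : Int) 2 = (((t.length : Nat) : Int)) / 2 := by
      rw [Int.tdiv_eq_ediv]
      simp
    have h2 : PySem.Int.floordiv ((t.length : Nat) : Int) 2 = (((t.length : Nat) : Int)) / 2 :=
      PySem.Int.floordiv_eq_ediv_of_pos (by omega)
    rw [h1, h2]

-- ===== VERDICT (by name: the statement is the Claim_ definition above) =====
theorem processLines_spec : Claim_equal_processLines := by
  intro allLines _ hPre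
  unfold Spec_processLines
  obtain ⟨hAll, _⟩ := hPre
  obtain ⟨hE, hS⟩ := pv_fold_agree allLines [] [] 0 hAll rfl
  simp only [processLines, processLines_alt]
  rw [← hE, ← hS, pv_idx_eq]
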